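-- pv_equiv track=rewrite | github.com/nextlevelbuilder/ui-ux-pro-max-skill | .shared/ui-ux-pro-max/scripts/a2ui_exporter.py | _determine_component_category
-- ===== SOURCE A (Python) =====
-- from typing import Dict, List, Optional, Tuple, Any
--
-- def _determine_component_category(term: str, result: Dict) -> str:
--     """Determine component category based on term and context"""
--     term_lower = term.lower()
--
--     # UI Control categories
--     if any(keyword in term_lower for keyword in ["button", "link", "input", "form", "select", "checkbox", "radio"]):
--         return "form_controls"
--     elif any(keyword in term_lower for keyword in ["modal", "dialog", "popup", "tooltip", "alert"]):
--         return "feedback"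
--     elif any(keyword in term_lower for keyword in ["nav", "menu", "breadcrumb", "pagination", "tab"]):
--         return "navigation"
--     elif any(keyword in term_lower for keyword in ["card", "panel", "grid", "list", "table"]):
--         return "layout"
--     elif any(keyword in term_lower for keyword in ["chart", "graph", "visualization", "progress"]):
--         return "data_display"
--     else:
--         return "general"
-- ===== SOURCE B (Python) =====
-- _CATEGORY_KEYWORDS = [
--     ("form_controls", ["button", "link", "input", "form", "select", "checkbox", "radio"]),
--     ("feedback", ["modal", "dialog", "popup", "tooltip", "alert"]),
--     ("navigation", ["nav", "menu", "breadcrumb", "pagination", "tab"]),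
--     ("layout", ["card", "panel", "grid", "list", "table"]),
--     ("data_display", ["chart", "graph", "visualization", "progress"]),
-- ]
--
-- _MAX_KW = max(len(kw) for _, kws in _CATEGORY_KEYWORDS for kw in kws)
--
--
-- def _determine_component_category(term: str, result: dict) -> str:
--     # Enumerate every substring of the lowered term no longer than the longest
--     # keyword once into a hash set, then classify by constant-time membership
--     # tests instead of scanning the term for each keyword.
--     t = term.lower()
--     n = len(t)
--     subs = {t[i:j] for i in range(n) for j in range(i + 1, min(n, i + _MAX_KW) + 1)}
--     for category, keywords in _CATEGORY_KEYWORDS: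
--         if any(kw in subs for kw in keywords):
--             return category
--     return "general"
-- ===== Notes on version B (the rewrite author's own statement) =====
-- stated objective: alternative
-- what changed: Instead of running a substring search over the term for each keyword in an if/elif chain, B enumerates all substrings of the lowered term up to the maximum keyword length once into a hash set and classifies by keyword set-membership tests in the same priority order.
import Mathlib
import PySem

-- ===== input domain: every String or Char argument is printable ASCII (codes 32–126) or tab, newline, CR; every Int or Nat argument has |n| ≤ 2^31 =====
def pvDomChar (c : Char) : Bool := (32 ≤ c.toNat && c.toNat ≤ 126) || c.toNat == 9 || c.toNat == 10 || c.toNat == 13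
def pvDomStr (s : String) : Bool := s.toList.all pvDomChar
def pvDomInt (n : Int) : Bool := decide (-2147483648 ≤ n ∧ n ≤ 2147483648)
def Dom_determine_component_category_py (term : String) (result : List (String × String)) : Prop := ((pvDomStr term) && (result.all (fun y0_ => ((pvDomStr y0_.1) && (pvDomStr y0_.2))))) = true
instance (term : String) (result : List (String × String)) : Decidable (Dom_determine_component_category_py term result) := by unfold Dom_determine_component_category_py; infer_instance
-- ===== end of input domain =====

-- B replaces A's per-keyword substring scans (if/elif chain over any(kw in term_lower …))
-- by one enumeration of the non-empty substrings of the lowered term no longer than the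
-- longest keyword into a set, then keyword set-membership tests in the same priority
-- order; objective: alternative.

-- ===== PORT A =====
def determine_component_category_py (term : String) (_result : List (String × String)) : String :=
  let term_lower := PySem.Str.lower term
  if ["button", "link", "input", "form", "select", "checkbox", "radio"].any
      (fun kw => PySem.Str.isIn kw term_lower) then "form_controls"
  else if ["modal", "dialog", "popup", "tooltip", "alert"].any
      (fun kw => PySem.Str.isIn kw term_lower) then "feedback"
  else if ["nav", "menu", "breadcrumb", "pagination", "tab"].any
      (fun kw => PySem.Str.isIn kw term_lower) then "navigation"
  else if ["card", "panel", "grid", "list", "table"].any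
      (fun kw => PySem.Str.isIn kw term_lower) then "layout"
  else if ["chart", "graph", "visualization", "progress"].any
      (fun kw => PySem.Str.isIn kw term_lower) then "data_display"
  else "general"

-- ===== PORT B =====
def pvCategoryKeywords : List (String × List String) :=
  [("form_controls", ["button", "link", "input", "form", "select", "checkbox", "radio"]),
   ("feedback", ["modal", "dialog", "popup", "tooltip", "alert"]),
   ("navigation", ["nav", "menu", "breadcrumb", "pagination", "tab"]),
   ("layout", ["card", "panel", "grid", "list", "table"]),
   ("data_display", ["chart", "graph", "visualization", "progress"])]

-- Source B's module-level _MAX_KW = max(len(kw) for _, kws in _CATEGORY_KEYWORDS for kw in kws)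
def pvMaxKw : Int :=
  (PySem.List.max? ((pvCategoryKeywords.map Prod.snd).flatten.map
    (fun kw => PySem.Str.len kw)) (fun x => x)).getD 0

-- Source B's set comprehension {t[i:j] for i in range(n) for j in range(i+1, min(n, i+_MAX_KW)+1)};
-- the Python set of strings is modelled as a PySem.Set of code-point lists (toList is injective).
def pvSubsOf (t : List Char) : PySem.Set (List Char) :=
  (PySem.List.pyRange 0 t.length 1).foldl (fun s i =>
    (PySem.List.pyRange (i + 1) (min ((t.length : Int)) (i + pvMaxKw) + 1) 1).foldl (fun s j =>
      PySem.Set.add s (PySem.List.slice t (some i) (some j))) s) PySem.Set.empty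

-- Source B's final loop over _CATEGORY_KEYWORDS: first category with a keyword in the set.
def pvPickCategory (subs : PySem.Set (List Char)) : List (String × List String) → String
  | [] => "general"
  | (category, keywords) :: rest =>
      if keywords.any (fun kw => PySem.Set.contains subs kw.toList) then category
      else pvPickCategory subs rest

def determine_component_category_py_alt (term : String) (_result : List (String × String)) : String :=
  let t := PySem.Str.lower term
  pvPickCategory (pvSubsOf t.toList) pvCategoryKeywords

-- ===== PRECONDITION & SPEC =====
def Spec_determine_component_category_py (term : String) (result : List (String × String)) (out : String) : Prop := out = determine_component_category_py_alt term result
instance (term : String) (result : List (String × String)) (out : String) : Decidable (Spec_determine_component_category_py term result out) := by unfold Spec_determine_component_category_py; infer_instance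

-- ===== CLAIM (what is proved, stated in full; the proofs are below) =====
def Claim_equal_determine_component_category_py : Prop := ∀ (term : String) (result : List (String × String)), Dom_determine_component_category_py term result → Spec_determine_component_category_py term result (determine_component_category_py term result)

-- ===== LEMMAS AND PROOFS =====

-- membership in a doubly nested fold of Set.add
theorem pv_mem_foldl_inner {α : Type} [BEq α] [LawfulBEq α] (l : List Int)
    (g : Int → List Int) (f : Int → Int → α) (s : PySem.Set α) (y : α) :
    (y ∈ l.foldl (fun s i => (g i).foldl (fun s j => PySem.Set.add s (f i j)) s) s) ↔
      y ∈ s ∨ ∃ i ∈ l, ∃ j ∈ g i, y = f i j := by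
  induction l generalizing s with
  | nil => simp
  | cons a l ih =>
    simp only [List.foldl_cons, ih, PySem.Set.mem_foldl_add, List.mem_cons]
    constructor
    · rintro ((h | ⟨j, hj, hy⟩) | ⟨i, hi, j, hj, hy⟩)
      · exact Or.inl h
      · exact Or.inr ⟨a, Or.inl rfl, j, hj, hy⟩
      · exact Or.inr ⟨i, Or.inr hi, j, hj, hy⟩
    · rintro (h | ⟨i, (rfl | hi), j, hj, hy⟩)
      · exact Or.inl (Or.inl h)
      · exact Or.inl (Or.inr ⟨j, hj, hy⟩)
      · exact Or.inr ⟨i, hi, j, hj, hy⟩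

theorem pv_mem_subsOf (t : List Char) (sub : List Char) :
    sub ∈ pvSubsOf t ↔
      ∃ i j : Nat, i < t.length ∧ i + 1 ≤ j ∧ j ≤ t.length ∧ j ≤ i + 13 ∧
        sub = (t.drop i).take (j - i) := by
  unfold pvSubsOf
  rw [show pvMaxKw = 13 from by decide, pv_mem_foldl_inner]
  simp only [PySem.Set.empty, List.not_mem_nil, false_or, PySem.List.mem_pyRange_one]
  constructor
  · rintro ⟨i, ⟨hi0, hin⟩, j, ⟨hij, hjn⟩, hy⟩
    refine ⟨i.toNat, j.toNat, by omega, by omega, by omega, by omega, ?_⟩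
    rw [hy, PySem.List.slice_toNat t hi0 (by omega)]
  · rintro ⟨i, j, hin, hij, hjn, hj13, hy⟩
    refine ⟨(i : Int), ⟨by omega, by omega⟩, (j : Int), ⟨by omega, by omega⟩, ?_⟩
    rw [hy, PySem.List.slice_natCast]

theorem pv_mem_subsOf_iff_isIn (t : List Char) (kw : List Char) (hk : kw ≠ [])
    (hk13 : kw.length ≤ 13) :
    kw ∈ pvSubsOf t ↔ PySem.Chars.isIn kw t = true := by
  rw [pv_mem_subsOf, ← PySem.Chars.exists_prefix_drop_iff_isIn]
  constructor
  · rintro ⟨i, j, _, _, _, _, hy⟩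
    exact ⟨i, hy ▸ List.take_prefix _ _⟩
  · rintro ⟨d, hpre⟩
    have hlen : kw.length ≤ (t.drop d).length := hpre.length_le
    have hkl : 0 < kw.length := List.length_pos_iff.mpr hk
    rw [List.length_drop] at hlen
    refine ⟨d, d + kw.length, by omega, by omega, by omega, by omega, ?_⟩
    have := List.prefix_iff_eq_take.mp hpre
    rw [Nat.add_sub_cancel_left]
    exact this

theorem pv_any_contains_eq (term_lower : String) (kws : List String)
    (h : ∀ kw ∈ kws, kw.toList ≠ [] ∧ kw.toList.length ≤ 13) :
    (kws.any fun kw => PySem.Set.contains (pvSubsOf term_lower.toList) kw.toList) =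
      (kws.any fun kw => PySem.Str.isIn kw term_lower) := by
  induction kws with
  | nil => rfl
  | cons kw kws ih =>
    simp only [List.any_cons]
    rw [ih (fun k hk => h k (List.mem_cons_of_mem _ hk))]
    congr 1
    have hne := h kw (List.mem_cons_self)
    have h1 : PySem.Set.contains (pvSubsOf term_lower.toList) kw.toList = true ↔
        PySem.Str.isIn kw term_lower = true := by
      rw [PySem.Set.contains_iff, pv_mem_subsOf_iff_isIn _ _ hne.1 hne.2, PySem.Str.isIn_eq]
    cases hc : PySem.Set.contains (pvSubsOf term_lower.toList) kw.toList
    · cases hs : PySem.Str.isIn kw term_lower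
      · rfl
      · rw [h1.mpr hs] at hc; exact hc.symm
    · exact (h1.mp hc).symm

-- ===== VERDICT (by name: the statement is the Claim_ definition above) =====
theorem determine_component_category_py_spec : Claim_equal_determine_component_category_py := by
  intro term result _
  unfold Spec_determine_component_category_py determine_component_category_py
    determine_component_category_py_alt pvCategoryKeywords
  simp only [pvPickCategory]
  rw [pv_any_contains_eq _ ["button", "link", "input", "form", "select", "checkbox", "radio"] (by decide),
      pv_any_contains_eq _ ["modal", "dialog", "popup", "tooltip", "alert"] (by decide),
      pv_any_contains_eq _ ["nav", "menu", "breadcrumb", "pagination", "tab"] (by decide),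
      pv_any_contains_eq _ ["card", "panel", "grid", "list", "table"] (by decide),
      pv_any_contains_eq _ ["chart", "graph", "visualization", "progress"] (by decide)]
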